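-- pv_equiv track=rewrite | github.com/PDilan321/Third-Year-Project | pushup_helper_methods.py | get_state_mapping
-- ===== SOURCE A (Python) =====
-- def get_state_mapping(smoothed_states, compressed_states):
--     mapping = []
--     compressed_index = 0
--     for i in range(len(smoothed_states)):
--         # If the current state is different from the previous one or it's the first element,
--         # it should correspond to the next compressed state element
--         if i == 0 or smoothed_states[i] != smoothed_states[i - 1]:
--             mapping.append((compressed_index, i))  # Store the compressed index and smoothed index
--             compressed_index += 1
--             if compressed_index >= len(compressed_states):  # Once we run out of compressed states, stop
--                 break
--     return mapping
-- ===== SOURCE B (Python) =====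
-- def get_state_mapping(smoothed_states, compressed_states):
--     n = len(smoothed_states)
--     k = len(compressed_states)
--     mapping = []
--     start = 0
--     ci = 0
--     while start < n:
--         mapping.append((ci, start))
--         ci += 1
--         if ci >= k:
--             break
--         v = smoothed_states[start]
--         j = start + 1
--         while j < n and smoothed_states[j] == v:
--             j += 1
--         start = j
--     return mapping
-- ===== Notes on version B (the rewrite author's own statement) =====
-- stated objective: alternative
-- what changed: B walks run-by-run with a while loop over run-start indices (inner scan skips the whole run), instead of A's per-index for loop comparing each element to its predecessor.
import Mathlib
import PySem

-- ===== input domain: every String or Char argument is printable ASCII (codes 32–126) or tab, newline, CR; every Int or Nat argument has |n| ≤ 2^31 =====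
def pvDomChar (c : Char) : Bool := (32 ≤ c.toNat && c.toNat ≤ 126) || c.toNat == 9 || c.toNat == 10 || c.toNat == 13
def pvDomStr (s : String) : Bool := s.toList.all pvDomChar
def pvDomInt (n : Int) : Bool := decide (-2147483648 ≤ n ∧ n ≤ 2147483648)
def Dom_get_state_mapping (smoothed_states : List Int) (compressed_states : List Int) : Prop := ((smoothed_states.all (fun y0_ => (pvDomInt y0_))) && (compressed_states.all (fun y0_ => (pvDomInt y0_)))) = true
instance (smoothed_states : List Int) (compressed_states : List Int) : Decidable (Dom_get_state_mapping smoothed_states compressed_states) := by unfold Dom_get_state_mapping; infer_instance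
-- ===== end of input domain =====

-- B re-implements A by iterating run-by-run (a while loop over run-start indices with an
-- inner scan skipping each run) instead of A's per-index loop comparing each element to
-- its predecessor; same O(n) cost, alternative structure.


-- ===== PORT A =====
-- A's for-loop over range(len(smoothed_states)) with its running (mapping, compressed_index)
-- state and the mid-loop break, as structural recursion on the index i.
-- Indexing smoothed_states[i] / [i-1] is always in range here (0 ≤ i-1, i < len), so
-- List.getD is exact for Python's indexing on every reached index.
def pvLoopA (ss cs : List Int) (i : Nat) (mapping : List (Int × Int)) (ci : Int) :
    List (Int × Int) :=
  if _h : i < ss.length then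
    if i = 0 ∨ ss.getD i 0 ≠ ss.getD (i - 1) 0 then
      let m' := mapping ++ [(ci, (i : Int))]
      if ci + 1 ≥ (cs.length : Int) then m'
      else pvLoopA ss cs (i + 1) m' (ci + 1)
    else pvLoopA ss cs (i + 1) mapping ci
  else mapping
termination_by ss.length - i

def get_state_mapping (smoothed_states : List Int) (compressed_states : List Int) : List (Int × Int) :=
  pvLoopA smoothed_states compressed_states 0 [] 0

-- ===== PORT B =====
-- B's inner while loop: first index j ≥ start at which the run of value v ends.
def pvRunEnd (ss : List Int) (v : Int) (j : Nat) : Nat :=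
  if _h : j < ss.length ∧ ss.getD j 0 = v then pvRunEnd ss v (j + 1) else j
termination_by ss.length - j

theorem pvRunEnd_ge (ss : List Int) (v : Int) (j : Nat) : j ≤ pvRunEnd ss v j := by
  fun_induction pvRunEnd ss v j with
  | case1 j h ih => omega
  | case2 j h => omega

-- B's outer while loop over run-start indices start, with state (mapping, ci).
def pvLoopB (ss cs : List Int) (start : Nat) (ci : Int) (mapping : List (Int × Int)) :
    List (Int × Int) :=
  if _h : start < ss.length then
    let m' := mapping ++ [(ci, (start : Int))]
    if ci + 1 ≥ (cs.length : Int) then m'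
    else pvLoopB ss cs (pvRunEnd ss (ss.getD start 0) (start + 1)) (ci + 1) m'
  else mapping
termination_by ss.length - start
decreasing_by
  have := pvRunEnd_ge ss (ss.getD start 0) (start + 1)
  omega

def get_state_mapping_alt (smoothed_states : List Int) (compressed_states : List Int) : List (Int × Int) :=
  pvLoopB smoothed_states compressed_states 0 0 []

-- ===== PRECONDITION & SPEC =====
def Spec_get_state_mapping (smoothed_states : List Int) (compressed_states : List Int) (out : List (Int × Int)) : Prop := out = get_state_mapping_alt smoothed_states compressed_states
instance (smoothed_states : List Int) (compressed_states : List Int) (out : List (Int × Int)) : Decidable (Spec_get_state_mapping smoothed_states compressed_states out) := by unfold Spec_get_state_mapping; infer_instance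

-- ===== CLAIM (what is proved, stated in full; the proofs are below) =====
def Claim_equal_get_state_mapping : Prop := ∀ (smoothed_states : List Int) (compressed_states : List Int), Dom_get_state_mapping smoothed_states compressed_states → Spec_get_state_mapping smoothed_states compressed_states (get_state_mapping smoothed_states compressed_states)

-- ===== LEMMAS AND PROOFS =====

theorem pvRunEnd_le (ss : List Int) (v : Int) (j : Nat) (h : j ≤ ss.length) :
    pvRunEnd ss v j ≤ ss.length := by
  fun_induction pvRunEnd ss v j with
  | case1 j h' ih => exact ih (by omega)
  | case2 j h' => exact h

theorem pvRunEnd_mem (ss : List Int) (v : Int) (j t : Nat) (h1 : j ≤ t)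
    (h2 : t < pvRunEnd ss v j) : ss.getD t 0 = v := by
  fun_induction pvRunEnd ss v j with
  | case1 j h' ih =>
    rcases Nat.eq_or_lt_of_le h1 with he | hl
    · subst he; exact h'.2
    · exact ih (by omega) h2
  | case2 j h' => omega

theorem pvRunEnd_stop (ss : List Int) (v : Int) (j : Nat)
    (h : pvRunEnd ss v j < ss.length) : ss.getD (pvRunEnd ss v j) 0 ≠ v := by
  fun_induction pvRunEnd ss v j with
  | case1 j h' ih => exact ih h
  | case2 j h' =>
    intro hv
    exact h' ⟨h, hv⟩

-- Inside a run (strictly between a run start and its end) A's loop appends nothing: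
-- it just advances the index to the run's end.
theorem pvLoopA_skip (ss cs : List Int) (start : Nat) (hstart : start < ss.length)
    (j : Nat) (hj1 : start < j) (hj2 : j ≤ pvRunEnd ss (ss.getD start 0) (start + 1))
    (m : List (Int × Int)) (ci : Int) :
    pvLoopA ss cs j m ci = pvLoopA ss cs (pvRunEnd ss (ss.getD start 0) (start + 1)) m ci := by
  set E := pvRunEnd ss (ss.getD start 0) (start + 1) with hE
  rcases Nat.eq_or_lt_of_le hj2 with he | hl
  · rw [he]
  · have hEle : E ≤ ss.length := pvRunEnd_le ss _ (start + 1) (by omega)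
    have hjn : j < ss.length := by omega
    have hjv : ss.getD j 0 = ss.getD start 0 := pvRunEnd_mem ss _ (start + 1) j (by omega) hl
    have hprev : ss.getD (j - 1) 0 = ss.getD start 0 := by
      rcases Nat.eq_or_lt_of_le (Nat.succ_le_of_lt hj1) with he1 | hl1
      · have : j - 1 = start := by omega
        rw [this]
      · exact pvRunEnd_mem ss _ (start + 1) (j - 1) (by omega) (by omega)
    rw [pvLoopA]
    simp only [hjn, dif_pos]
    have hc : ¬ (j = 0 ∨ ss.getD j 0 ≠ ss.getD (j - 1) 0) := by
      push Not
      exact ⟨by omega, by rw [hjv, hprev]⟩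
    rw [if_neg hc]
    exact pvLoopA_skip ss cs start hstart (j + 1) (by omega) hl m ci
termination_by pvRunEnd ss (ss.getD start 0) (start + 1) - j
decreasing_by simp only [List.getD] at *; omega

-- The core correspondence: at any run-start index, A's per-index loop and B's
-- run-by-run loop produce the same result from the same state.
theorem pvLoopA_eq_pvLoopB (ss cs : List Int) (start : Nat)
    (hrs : start = 0 ∨ ss.getD start 0 ≠ ss.getD (start - 1) 0)
    (m : List (Int × Int)) (ci : Int) :
    pvLoopA ss cs start m ci = pvLoopB ss cs start ci m := by
  rw [pvLoopA, pvLoopB]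
  by_cases h : start < ss.length
  · simp only [h, dif_pos, if_pos hrs]
    by_cases hb : ci + 1 ≥ (cs.length : Int)
    · rw [if_pos hb, if_pos hb]
    · rw [if_neg hb, if_neg hb]
      set E := pvRunEnd ss (ss.getD start 0) (start + 1) with hE
      have hge : start + 1 ≤ E := pvRunEnd_ge ss _ (start + 1)
      have hle : E ≤ ss.length := pvRunEnd_le ss _ (start + 1) (by omega)
      rw [pvLoopA_skip ss cs start h (start + 1) (by omega) hge]
      by_cases hEn : E < ss.length
      · have hrs' : E = 0 ∨ ss.getD E 0 ≠ ss.getD (E - 1) 0 := by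
          right
          have hstop : ss.getD E 0 ≠ ss.getD start 0 := pvRunEnd_stop ss _ (start + 1) hEn
          have hprev : ss.getD (E - 1) 0 = ss.getD start 0 := by
            rcases Nat.eq_or_lt_of_le hge with he1 | hl1
            · have : E - 1 = start := by omega
              rw [this]
            · exact pvRunEnd_mem ss _ (start + 1) (E - 1) (by omega) (by omega)
          rw [hprev]; exact hstop
        exact pvLoopA_eq_pvLoopB ss cs E hrs' _ (ci + 1)
      · have hEn' : ¬ pvRunEnd ss (ss.getD start 0) (start + 1) < ss.length := by omega
        rw [pvLoopA, pvLoopB, dif_neg hEn', dif_neg hEn']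
  · simp only [h, dif_neg, not_false_iff]
termination_by ss.length - start
decreasing_by
  have hge : start + 1 ≤ pvRunEnd ss (ss.getD start 0) (start + 1) := pvRunEnd_ge ss _ _
  omega

-- ===== VERDICT (by name: the statement is the Claim_ definition above) =====
theorem get_state_mapping_spec : Claim_equal_get_state_mapping := by
  intro ss cs _hDom
  unfold Spec_get_state_mapping get_state_mapping get_state_mapping_alt
  exact pvLoopA_eq_pvLoopB ss cs 0 (Or.inl rfl) [] 0
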